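-- pv_equiv track=rewrite | github.com/Califer1221/VSAGE | Layout/Layout_1st_order_65nm_py/Area_estimation.py | res_gen
-- ===== SOURCE A (Python) =====
-- def res_gen(z):
--     res_units = [25, 10, 5, 1]
--     s = [0] * len(res_units)
--     for i, unit in enumerate(res_units):
--         a = z // unit
--         s[i] = a
--         z -= a * unit
--     return s
-- ===== SOURCE B (Python) =====
-- # Table-driven: only z // 25 needs arithmetic; the (10, 5, 1)-part of the answer
-- # depends only on z % 25, so it is read from a precomputed 25-entry lookup table.
-- _TAIL = [
--     [0, 0, 0], [0, 0, 1], [0, 0, 2], [0, 0, 3], [0, 0, 4],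
--     [0, 1, 0], [0, 1, 1], [0, 1, 2], [0, 1, 3], [0, 1, 4],
--     [1, 0, 0], [1, 0, 1], [1, 0, 2], [1, 0, 3], [1, 0, 4],
--     [1, 1, 0], [1, 1, 1], [1, 1, 2], [1, 1, 3], [1, 1, 4],
--     [2, 0, 0], [2, 0, 1], [2, 0, 2], [2, 0, 3], [2, 0, 4],
-- ]
--
-- def res_gen(z):
--     q25, r = divmod(z, 25)
--     return [q25] + _TAIL[r]
-- ===== Notes on version B (the rewrite author's own statement) =====
-- stated objective: alternative
-- what changed: Replaced the greedy division loop by a single divmod by 25 plus a precomputed 25-entry lookup table for the (10,5,1) part, which depends only on z % 25.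
import Mathlib
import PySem

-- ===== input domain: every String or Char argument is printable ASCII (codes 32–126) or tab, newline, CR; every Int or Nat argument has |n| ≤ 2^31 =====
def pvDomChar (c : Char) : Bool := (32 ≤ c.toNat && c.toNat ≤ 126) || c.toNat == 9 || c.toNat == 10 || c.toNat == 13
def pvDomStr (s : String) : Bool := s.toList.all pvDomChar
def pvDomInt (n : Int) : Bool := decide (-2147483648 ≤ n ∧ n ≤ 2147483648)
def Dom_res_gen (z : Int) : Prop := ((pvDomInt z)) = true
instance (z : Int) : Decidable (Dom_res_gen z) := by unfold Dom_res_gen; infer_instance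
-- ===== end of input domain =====

-- B replaces A's greedy division loop by one divmod by 25 plus a precomputed
-- 25-entry lookup table for the (10,5,1) part; objective: alternative.


-- ===== PORT A =====
-- for i, unit in enumerate(res_units): a = z // unit; s[i] = a; z -= a * unit
def res_gen (z : Int) : List Int :=
  let res_units : List Int := [25, 10, 5, 1]
  let s : List Int := List.replicate res_units.length 0
  let state := (PySem.List.enumerate res_units).foldl
    (fun (st : List Int × Int) iu =>
      let a := PySem.Int.floordiv st.2 iu.2
      (st.1.set iu.1.toNat a, st.2 - a * iu.2)) (s, z)
  state.1

-- ===== PORT B =====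
def pvTail : List (List Int) :=
  [[0, 0, 0], [0, 0, 1], [0, 0, 2], [0, 0, 3], [0, 0, 4],
   [0, 1, 0], [0, 1, 1], [0, 1, 2], [0, 1, 3], [0, 1, 4],
   [1, 0, 0], [1, 0, 1], [1, 0, 2], [1, 0, 3], [1, 0, 4],
   [1, 1, 0], [1, 1, 1], [1, 1, 2], [1, 1, 3], [1, 1, 4],
   [2, 0, 0], [2, 0, 1], [2, 0, 2], [2, 0, 3], [2, 0, 4]]

-- q25, r = divmod(z, 25); return [q25] + _TAIL[r]
-- (_TAIL[r] via pyGet?; r = z % 25 is always in 0..24, so the .getD [] default is never taken)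
def res_gen_alt (z : Int) : List Int :=
  let q25 := PySem.Int.floordiv z 25
  let r := PySem.Int.mod z 25
  [q25] ++ (PySem.List.pyGet? pvTail r).getD []

-- ===== PRECONDITION & SPEC =====
def Spec_res_gen (z : Int) (out : List Int) : Prop := out = res_gen_alt z
instance (z : Int) (out : List Int) : Decidable (Spec_res_gen z out) := by unfold Spec_res_gen; infer_instance

-- ===== CLAIM =====
def Claim_equal_res_gen : Prop := ∀ (z : Int), Dom_res_gen z → Spec_res_gen z (res_gen z)

-- ===== LEMMAS AND PROOFS =====

-- the table row at r (0 ≤ r < 25) is exactly [r // 10, (r % 10) // 5, r % 5]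
theorem pvTail_row (r : Int) (h0 : 0 ≤ r) (h1 : r < 25) :
    (PySem.List.pyGet? pvTail r).getD []
      = [PySem.Int.floordiv r 10,
         PySem.Int.floordiv (PySem.Int.mod r 10) 5,
         PySem.Int.mod r 5] := by
  interval_cases r <;> decide

theorem res_gen_eq_alt (z : Int) : res_gen z = res_gen_alt z := by
  have h0 := PySem.Int.mod_nonneg z (b := 25) (by norm_num)
  have h1 := PySem.Int.mod_lt z (b := 25) (by norm_num)
  simp only [res_gen, res_gen_alt, PySem.List.enumerate, List.foldl]
  rw [pvTail_row _ h0 h1]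
  have h25 := PySem.Int.floordiv_mul_add_mod z 25
  have e1 : z - PySem.Int.floordiv z 25 * 25 = PySem.Int.mod z 25 := by omega
  rw [e1]
  set r := PySem.Int.mod z 25 with hr
  have h10 := PySem.Int.floordiv_mul_add_mod r 10
  have e2 : r - PySem.Int.floordiv r 10 * 10 = PySem.Int.mod r 10 := by omega
  rw [e2]
  set r2 := PySem.Int.mod r 10 with hr2
  have h5 := PySem.Int.floordiv_mul_add_mod r2 5
  have e3 : r2 - PySem.Int.floordiv r2 5 * 5 = PySem.Int.mod r2 5 := by omega
  rw [e3]
  -- last table entry is r % 5; the loop's residue is (r % 10) % 5 — equal since 5 ∣ 10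
  have h2l := PySem.Int.mod_nonneg r (b := 10) (by norm_num)
  have h2u := PySem.Int.mod_lt r (b := 10) (by norm_num)
  have hq := PySem.Int.floordiv_mul_add_mod r 5
  have h5l := PySem.Int.mod_nonneg r (b := 5) (by norm_num)
  have h5u := PySem.Int.mod_lt r (b := 5) (by norm_num)
  have h25l := PySem.Int.mod_nonneg r2 (b := 5) (by norm_num)
  have h25u := PySem.Int.mod_lt r2 (b := 5) (by norm_num)
  have hdq := PySem.Int.floordiv_mul_add_mod r2 5
  have hmm : PySem.Int.mod r2 5 = PySem.Int.mod r 5 := by omega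
  rw [← hmm]
  simp [PySem.Int.floordiv, PySem.Int.mod]

-- ===== VERDICT =====
theorem res_gen_spec : Claim_equal_res_gen := by
  intro z _; exact res_gen_eq_alt z
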